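-- pv_equiv track=rewrite | github.com/gabrielcnr/advent_of_code_2019 | src/aoc19/day08/day08.py | calculate_final_pixels
-- ===== SOURCE A (Python) =====
-- import itertools
--
-- def iter_rows(pixels, w):
--     row = []
--     for i, pixel in enumerate(pixels, 1):
--         row.append(pixel)
--         if i % w == 0:
--             yield tuple(row)
--             row = []
--
-- def iter_layers(pixels, w, h):
--     layer = []
--     for i, row in enumerate(iter_rows(pixels, w), 1):
--         layer.append(row)
--         if i % h == 0:
--             yield layer
--             layer = []
--
-- def iter_pixels(layer):
--     for pixel in itertools.chain(*layer):
--         yield pixel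
--
-- def calculate_final_pixels(pixels, w, h):
--     _layers = list(iter_layers(pixels, w, h))
--     layer_pixels = [iter_pixels(l) for l in _layers]
--
--     pixels_in_image = []
--     for row in range(w):
--         pixels_in_row = []
--         for col in range(h):
--             for p in [next(l) for l in layer_pixels]:
--                 if p != '2': # first non-transparent pixel
--                     break
--             pixels_in_row.append(p)
--         pixels_in_image.append(tuple(pixels_in_row))
--
--     return pixels_in_image
-- ===== SOURCE B (Python) =====
-- def _first_opaque(layers, i):
--     for layer in layers:
--         if layer[i] != '2':
--             return layer[i]
--     return layers[-1][i]
--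
--
-- def calculate_final_pixels(pixels, w, h):
--     px = list(pixels)
--     size = w * h
--     layers = [px[k * size:(k + 1) * size] for k in range(len(px) // size)]
--     final = [_first_opaque(layers, i) for i in range(size)]
--     return [tuple(final[r * h:(r + 1) * h]) for r in range(w)]
-- ===== Notes on version B (the rewrite author's own statement) =====
-- stated objective: simpler
-- what changed: Replaces A's three chained generators and the iterator-consuming triple nested loop by direct slicing: layers are w*h-sized slices of the pixel list, a flat list of first-opaque pixels is built by index, and the w-rows-of-h output is produced by reshaping that flat list with slices.
-- outside the precondition, e.g. on calculate_final_pixels([], 0, 3): A returns [], B raises ZeroDivisionError; on calculate_final_pixels(['1'], -2, 0): A returns [], B raises ZeroDivisionError; on calculate_final_pixels(['1', '2'], -2, -5): A returns [], B raises IndexError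
import Mathlib
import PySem

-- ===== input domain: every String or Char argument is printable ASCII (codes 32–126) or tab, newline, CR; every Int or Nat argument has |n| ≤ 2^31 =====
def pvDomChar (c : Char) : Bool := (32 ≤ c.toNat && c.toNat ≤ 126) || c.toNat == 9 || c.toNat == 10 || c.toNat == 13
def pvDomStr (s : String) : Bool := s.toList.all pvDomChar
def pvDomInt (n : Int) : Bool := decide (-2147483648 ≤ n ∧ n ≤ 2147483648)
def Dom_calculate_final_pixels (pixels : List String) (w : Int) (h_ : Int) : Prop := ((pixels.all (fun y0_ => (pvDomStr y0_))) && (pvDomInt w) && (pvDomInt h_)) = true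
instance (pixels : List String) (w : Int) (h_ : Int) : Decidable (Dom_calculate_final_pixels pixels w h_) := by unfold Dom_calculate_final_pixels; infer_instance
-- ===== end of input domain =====

-- B replaces A's chained generators and iterator-consuming triple loop by direct slicing
-- (w*h-sized layer slices, an indexed flat pass, reshape by slices); objective: simpler.


-- ===== PORT A =====
-- iter_rows / iter_layers share one generator shape: accumulate, emit when the
-- 1-based counter i satisfies i % m == 0 (PySem.Int.mod = Python's %).
def pyGroupGo {α : Type} (m : Int) : List α → Int → List α → List (List α) → List (List α)
  | [], _, _cur, acc => acc
  | x :: rest, i, cur, acc =>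
      let cur' := cur ++ [x]
      if PySem.Int.mod i m = 0 then pyGroupGo m rest (i + 1) [] (acc ++ [cur'])
      else pyGroupGo m rest (i + 1) cur' acc

def iterRows (pixels : List String) (w : Int) : List (List String) :=
  pyGroupGo w pixels 1 [] []

def iterLayers (pixels : List String) (w : Int) (h : Int) : List (List (List String)) :=
  pyGroupGo h (iterRows pixels w) 1 [] []

-- 'for p in ps: if p != '2': break' then use p (empty ps is a Python NameError,
-- unreachable under Pre_; "" stands in to stay total)
def firstBreak : List String → String
  | [] => ""
  | [p] => p
  | p :: q :: rest => if p ≠ "2" then p else firstBreak (q :: rest)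

def calculate_final_pixels (pixels : List String) (w : Int) (h_ : Int) : List (List String) :=
  let layers := iterLayers pixels w h_
  let layerPixels := layers.map List.flatten   -- iter_pixels = chain(*layer); the fold below consumes it head by head like next()
  let res := (PySem.List.pyRange 0 w 1).foldl
    (fun (st : List (List String) × List (List String)) _row =>
      let inner := (PySem.List.pyRange 0 h_ 1).foldl
        (fun (st2 : List (List String) × List String) _col =>
          let ps := st2.1.map (fun l => l.headD "")   -- [next(l) for l in layer_pixels]
          let p := firstBreak ps
          (st2.1.map List.tail, st2.2 ++ [p]))
        (st.1, [])
      (inner.1, st.2 ++ [inner.2]))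
    (layerPixels, [])
  res.2

-- ===== PORT B =====
-- first layer pixel != '2', falling back to the bottom layer's pixel (layers[-1][i])
def firstOpaque (layers : List (List String)) (i : Int) : String :=
  match layers.find? (fun l => (PySem.List.pyGet? l i).getD "" ≠ "2") with
  | some l => (PySem.List.pyGet? l i).getD ""
  | none => (PySem.List.pyGet? ((PySem.List.pyGet? layers (-1)).getD []) i).getD ""

def calculate_final_pixels_alt (pixels : List String) (w : Int) (h_ : Int) : List (List String) :=
  let px := pixels
  let size := w * h_
  let layers := (PySem.List.pyRange 0 (PySem.Int.floordiv (px.length : Int) size) 1).map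
    (fun k => PySem.List.slice px (some (k * size)) (some ((k + 1) * size)))
  let final := (PySem.List.pyRange 0 size 1).map (fun i => firstOpaque layers i)
  (PySem.List.pyRange 0 w 1).map
    (fun r => PySem.List.slice final (some (r * h_)) (some ((r + 1) * h_)))

-- ===== PRECONDITION & SPEC =====
-- Pre_ excludes zero dimensions and inputs with fewer than w*h pixels when w*h > 0:
-- there A either raises (ZeroDivisionError/NameError) or returns [] from loops that
-- never run, while B's slice/index-based layering raises (ZeroDivision/IndexError).
def Pre_calculate_final_pixels (pixels : List String) (w : Int) (h_ : Int) : Prop :=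
  w ≠ 0 ∧ h_ ≠ 0 ∧ (0 < w * h_ → w * h_ ≤ (pixels.length : Int))
instance (pixels : List String) (w : Int) (h_ : Int) : Decidable (Pre_calculate_final_pixels pixels w h_) := by
  unfold Pre_calculate_final_pixels; infer_instance

def pvWitness_calculate_final_pixels : List String × Int × Int := (["1", "2", "2", "0"], 2, 2)

def Spec_calculate_final_pixels (pixels : List String) (w : Int) (h_ : Int) (out : List (List String)) : Prop := out = calculate_final_pixels_alt pixels w h_
instance (pixels : List String) (w : Int) (h_ : Int) (out : List (List String)) : Decidable (Spec_calculate_final_pixels pixels w h_ out) := by unfold Spec_calculate_final_pixels; infer_instance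

-- ===== CLAIM (what is proved, stated in full; the proofs are below) =====
def Claim_equal_calculate_final_pixels : Prop := ∀ (pixels : List String) (w : Int) (h_ : Int), Dom_calculate_final_pixels pixels w h_ → Pre_calculate_final_pixels pixels w h_ → Spec_calculate_final_pixels pixels w h_ (calculate_final_pixels pixels w h_)



-- ===== LEMMAS AND PROOFS =====

-- contiguous chunks of size m, remainder dropped — common normal form of both layerings
def chunks {α : Type} (m : Nat) (l : List α) : List (List α) :=
  if _h : 0 < m ∧ m ≤ l.length then l.take m :: chunks m (l.drop m) else []
termination_by l.length
decreasing_by simp; omega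

theorem chunks_nil_of_short {α : Type} (m : Nat) (l : List α) (h : l.length < m) :
    chunks m l = [] := by
  rw [chunks, dif_neg]; omega

theorem chunks_cons_of_le {α : Type} (m : Nat) (l : List α) (hm : 0 < m) (h : m ≤ l.length) :
    chunks m l = l.take m :: chunks m (l.drop m) := by
  rw [chunks, dif_pos ⟨hm, h⟩]

theorem pyGroupGo_eq {α : Type} (m' : Nat) (hm : 0 < m') :
    ∀ (l cur : List α) (acc : List (List α)) (k : Nat), cur.length < m' →
      pyGroupGo (m' : Int) l ((k * m' + cur.length + 1 : Nat) : Int) cur acc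
        = acc ++ chunks m' (cur ++ l) := by
  intro l
  induction l with
  | nil =>
    intro cur acc k hcur
    simp [pyGroupGo, chunks_nil_of_short m' cur (by simpa using hcur)]
  | cons x rest ih =>
    intro cur acc k hcur
    rw [pyGroupGo]
    have hdvd : (PySem.Int.mod ((k * m' + cur.length + 1 : Nat) : Int) (m' : Int) = 0)
        ↔ cur.length + 1 = m' := by
      rw [PySem.Int.mod_eq_zero_iff_dvd, Int.natCast_dvd_natCast]
      constructor
      · intro hd
        have harr : k * m' + cur.length + 1 = k * m' + (cur.length + 1) := by omega
        rw [harr] at hd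
        have hd2 : m' ∣ cur.length + 1 := (Nat.dvd_add_right ⟨k, mul_comm k m'⟩).mp hd
        have := Nat.le_of_dvd (by omega) hd2
        omega
      · intro he
        exact ⟨k + 1, by rw [← he]; ring⟩
    by_cases hc : cur.length + 1 = m'
    · rw [if_pos (hdvd.mpr hc)]
      have hcI : ((m' : Nat) : Int) = (cur.length : Int) + 1 := by exact_mod_cast hc.symm
      have hctr : ((k * m' + cur.length + 1 : Nat) : Int) + 1
          = (((k + 1) * m' + ([] : List α).length + 1 : Nat) : Int) := by
        simp only [List.length_nil]
        push_cast
        rw [hcI]; ring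
      rw [hctr, ih [] (acc ++ [cur ++ [x]]) (k + 1) hm]
      have hlen : m' ≤ (cur ++ x :: rest).length := by simp; omega
      rw [chunks_cons_of_le m' _ hm hlen]
      have hsplit : cur ++ x :: rest = (cur ++ [x]) ++ rest := by simp
      have htake : (cur ++ x :: rest).take m' = cur ++ [x] := by
        rw [hsplit, ← show (cur ++ [x]).length = m' by simp; omega, List.take_left]
      have hdrop : (cur ++ x :: rest).drop m' = rest := by
        rw [hsplit, ← show (cur ++ [x]).length = m' by simp; omega, List.drop_left]
      rw [htake, hdrop]; simp
    · rw [if_neg (fun h => hc (hdvd.mp h))]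
      have hctr : ((k * m' + cur.length + 1 : Nat) : Int) + 1
          = ((k * m' + (cur ++ [x]).length + 1 : Nat) : Int) := by
        push_cast [List.length_append, List.length_cons, List.length_nil]; ring
      rw [hctr, ih (cur ++ [x]) acc k (by simp; omega)]
      simp

theorem iterRows_eq (pixels : List String) (w' : Nat) (hw : 0 < w') :
    iterRows pixels (w' : Int) = chunks w' pixels := by
  have := pyGroupGo_eq w' hw pixels [] [] 0 (by simpa)
  simpa [iterRows] using this

theorem iterLayers_eq (pixels : List String) (w' h' : Nat) (hw : 0 < w') (hh : 0 < h') :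
    iterLayers pixels (w' : Int) (h' : Int) = chunks h' (chunks w' pixels) := by
  have := pyGroupGo_eq h' hh (iterRows pixels (w' : Int)) [] [] 0 (by simpa)
  simp only [iterLayers]
  simpa [iterRows_eq pixels w' hw] using this

theorem chunks_drop_take {α : Type} (m : Nat) (hm : 0 < m) :
    ∀ (t : Nat) (l : List α), t * m ≤ l.length →
      (chunks m l).drop t = chunks m (l.drop (t * m)) ∧
      ((chunks m l).take t).flatten = l.take (t * m) := by
  intro t
  induction t with
  | zero => intro l _; simp
  | succ t ih =>
    intro l hlen
    have hexp : (t + 1) * m = t * m + m := Nat.succ_mul t m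
    have hm2 : m ≤ l.length := by omega
    rw [chunks_cons_of_le m l hm hm2]
    have hrec := ih (l.drop m) (by rw [List.length_drop]; omega)
    constructor
    · rw [List.drop_succ_cons, hrec.1, List.drop_drop]
      congr 2 <;> omega
    · rw [List.take_succ_cons, List.flatten_cons, hrec.2]
      have h2 : (t + 1) * m = m + t * m := by ring
      rw [h2, List.take_add]

theorem chunks_length {α : Type} (m : Nat) (hm : 0 < m) :
    ∀ (n : Nat) (l : List α), l.length = n → (chunks m l).length = l.length / m := by
  intro n
  induction n using Nat.strong_induction_on with
  | _ n ih =>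
    intro l hn
    by_cases h : m ≤ l.length
    · rw [chunks_cons_of_le m l hm h, List.length_cons,
        ih (l.length - m) (by omega) (l.drop m) (by rw [List.length_drop])]
      rw [List.length_drop, Nat.div_eq_sub_div hm h]
    · rw [chunks_nil_of_short m l (by omega), List.length_nil,
        Nat.div_eq_of_lt (by omega)]

theorem map_flatten_chunks_chunks {α : Type} (w' h' : Nat) (hw : 0 < w') (hh : 0 < h') :
    ∀ (n : Nat) (l : List α), l.length = n →
      (chunks h' (chunks w' l)).map List.flatten = chunks (w' * h') l := by
  intro n
  induction n using Nat.strong_induction_on with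
  | _ n ih =>
    intro l hn
    have hcomm : w' * h' = h' * w' := by ring
    by_cases hbig : h' * w' ≤ l.length
    · have hpos : 0 < h' * w' := by positivity
      have hlenc : h' ≤ (chunks w' l).length := by
        rw [chunks_length w' hw l.length l rfl]
        exact (Nat.le_div_iff_mul_le hw).mpr hbig
      rw [chunks_cons_of_le h' (chunks w' l) hh hlenc]
      have hdt := chunks_drop_take w' hw h' l hbig
      rw [List.map_cons, hdt.2, hdt.1]
      rw [ih (l.length - h' * w') (by omega) (l.drop (h' * w')) (by rw [List.length_drop])]
      rw [chunks_cons_of_le (w' * h') l (by positivity) (by omega)]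
      rw [hcomm]
    · rw [chunks_nil_of_short h' (chunks w' l)
        (by rw [chunks_length w' hw l.length l rfl]
            exact (Nat.div_lt_iff_lt_mul hw).mpr (by omega)),
        chunks_nil_of_short (w' * h') l (by omega), List.map_nil]

theorem range_map_slice_eq_chunks {α : Type} (m : Nat) (hm : 0 < m) :
    ∀ (n : Nat) (l : List α), l.length = n →
      (List.range (l.length / m)).map (fun k => (l.drop (k * m)).take m) = chunks m l := by
  intro n
  induction n using Nat.strong_induction_on with
  | _ n ih =>
    intro l hn
    by_cases h : m ≤ l.length
    · rw [Nat.div_eq_sub_div hm h, List.range_succ_eq_map, List.map_cons, List.map_map]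
      rw [chunks_cons_of_le m l hm h]
      have h0 : (l.drop (0 * m)).take m = l.take m := by simp
      rw [h0]
      congr 1
      have := ih (l.length - m) (by omega) (l.drop m) (by rw [List.length_drop])
      rw [List.length_drop] at this
      rw [← this]
      apply List.map_congr_left
      intro k _
      simp only [Function.comp_apply]
      rw [List.drop_drop]
      have hsm : Nat.succ k * m = k * m + m := Nat.succ_mul k m
      first
      | rfl
      | (congr 2 <;> omega)
    · rw [Nat.div_eq_of_lt (by omega), chunks_nil_of_short m l (by omega)]
      simp

theorem firstBreak_eq_firstOpaque (i : Nat) :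
    ∀ lp : List (List String),
      firstBreak (lp.map (fun l => l[i]?.getD "")) = firstOpaque lp (i : Int) := by
  intro lp
  induction lp with
  | nil => simp [firstBreak, firstOpaque, PySem.List.pyGet?_neg_one]
  | cons l rest ih =>
    by_cases h2 : l[i]?.getD "" = "2"
    · cases rest with
      | nil =>
        simp only [List.map_cons, List.map_nil, firstBreak, firstOpaque]
        rw [List.find?_cons_of_neg (by simp [h2])]
        simp [PySem.List.pyGet?_neg_one, h2]
      | cons r rs =>
        have hL : firstBreak ((l :: r :: rs).map (fun l => l[i]?.getD ""))
            = firstBreak ((r :: rs).map (fun l => l[i]?.getD "")) := by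
          simp only [List.map_cons, firstBreak]
          rw [if_neg (by simp [h2])]
        have hR : firstOpaque (l :: r :: rs) (i : Int) = firstOpaque (r :: rs) (i : Int) := by
          simp only [firstOpaque]
          rw [List.find?_cons_of_neg (by simp [h2])]
          rw [PySem.List.pyGet?_neg_one, PySem.List.pyGet?_neg_one, List.getLast?_cons_cons]
        rw [hL, hR, ← ih]
    · have hfind : (l :: rest).find? (fun l => decide ((PySem.List.pyGet? l (i : Int)).getD "" ≠ "2"))
          = some l := List.find?_cons_of_pos (by simp [h2])
      cases rest with
      | nil =>
        simp only [List.map_cons, List.map_nil, firstBreak, firstOpaque, hfind]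
        simp
      | cons r rs =>
        simp only [List.map_cons, firstBreak, firstOpaque, hfind]
        rw [if_pos (by simp [h2])]
        simp

theorem A_inner :
    ∀ (L : List Int) (lp : List (List String)) (acc : List String),
      L.foldl (fun (st2 : List (List String) × List String) _ =>
          (st2.1.map List.tail, st2.2 ++ [firstBreak (st2.1.map (fun l => l.headD ""))]))
        (lp, acc)
      = (lp.map (fun l => l.drop L.length),
         acc ++ (List.range L.length).map (fun c =>
           firstBreak (lp.map (fun l => l[c]?.getD "")))) := by
  intro L
  induction L with
  | nil => intro lp acc; simp
  | cons x xs ih =>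
    intro lp acc
    rw [List.foldl_cons]
    dsimp only
    rw [ih]
    simp only [List.length_cons, Prod.mk.injEq]
    refine ⟨?_, ?_⟩
    · rw [List.map_map]
      apply List.map_congr_left
      intro l _
      simp only [Function.comp_apply]
      rw [← List.drop_one, List.drop_drop]
      congr 1
      omega
    · rw [List.range_succ_eq_map, List.map_cons, List.map_map, List.append_assoc,
        List.singleton_append]
      congr 1
      congr 1
      · congr 1
        apply List.map_congr_left
        intro l _
        cases l <;> simp
      · apply List.map_congr_left
        intro c _
        simp only [Function.comp_apply]
        congr 1
        rw [List.map_map]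
        apply List.map_congr_left
        intro l _
        simp only [Function.comp_apply]
        cases l <;> simp

theorem A_outer (L2 : List Int) :
    ∀ (L : List Int) (lp : List (List String)) (acc : List (List String)),
      L.foldl (fun (st : List (List String) × List (List String)) _ =>
          ((L2.foldl (fun (st2 : List (List String) × List String) _ =>
              (st2.1.map List.tail, st2.2 ++ [firstBreak (st2.1.map (fun l => l.headD ""))]))
            (st.1, [])).1,
           st.2 ++ [(L2.foldl (fun (st2 : List (List String) × List String) _ =>
              (st2.1.map List.tail, st2.2 ++ [firstBreak (st2.1.map (fun l => l.headD ""))]))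
            (st.1, [])).2]))
        (lp, acc)
      = (lp.map (fun l => l.drop (L.length * L2.length)),
         acc ++ (List.range L.length).map (fun rr => (List.range L2.length).map (fun c =>
           firstBreak (lp.map (fun l => l[rr * L2.length + c]?.getD ""))))) := by
  intro L
  induction L with
  | nil => intro lp acc; simp
  | cons x xs ih =>
    intro lp acc
    rw [List.foldl_cons]
    dsimp only
    rw [A_inner L2 lp [], ih]
    simp only [List.length_cons, Prod.mk.injEq]
    have hsm : (xs.length + 1) * L2.length = xs.length * L2.length + L2.length :=
      Nat.succ_mul _ _
    refine ⟨?_, ?_⟩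
    · rw [List.map_map]
      apply List.map_congr_left
      intro l _
      simp only [Function.comp_apply]
      rw [List.drop_drop]
      congr 1
      omega
    · rw [List.range_succ_eq_map, List.map_cons, List.map_map, List.nil_append,
        List.append_assoc, List.singleton_append]
      congr 1
      congr 1
      · apply List.map_congr_left
        intro c _
        congr 1
        apply List.map_congr_left
        intro l _
        simp
      · apply List.map_congr_left
        intro rr _
        simp only [Function.comp_apply]
        apply List.map_congr_left
        intro c _
        congr 1
        rw [List.map_map]
        apply List.map_congr_left
        intro l _
        simp only [Function.comp_apply]
        rw [List.getElem?_drop]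
        have h2 : rr.succ * L2.length = rr * L2.length + L2.length := Nat.succ_mul _ _
        have h3 : (rr + 1) * L2.length = rr * L2.length + L2.length := h2
        congr 2
        omega

theorem foldl_pair_const {γ σ β : Type} (c : β) :
    ∀ (L : List γ) (a : σ) (acc : List β),
      L.foldl (fun st _ => (st.1, st.2 ++ [c])) (a, acc) = (a, acc ++ List.replicate L.length c) := by
  intro L
  induction L with
  | nil => intro a acc; simp
  | cons x xs ih =>
    intro a acc
    rw [List.foldl_cons]
    dsimp only
    rw [ih, List.length_cons, List.replicate_succ]
    simp

theorem map_range_drop_take {β : Type} (f : Nat → β) (N a b : Nat) (h : a + b ≤ N) :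
    (((List.range N).map f).drop a).take b = (List.range b).map (fun c => f (a + c)) := by
  apply List.ext_getElem
  · simp; omega
  · intro i h1 h2
    simp [List.getElem_take, List.getElem_drop]

theorem slice_nil {α : Type} (a b : Int) :
    PySem.List.slice ([] : List α) (some a) (some b) = [] := by
  have h := PySem.List.length_slice ([] : List α) a b
  have ha := PySem.List.clampIdx_le ([] : List α).length a
  have hb := PySem.List.clampIdx_le ([] : List α).length b
  simp at h ha hb
  exact List.eq_nil_of_length_eq_zero (by omega)

-- ===== VERDICT (by name: the statement is the Claim_ definition above) =====
theorem calculate_final_pixels_spec : Claim_equal_calculate_final_pixels := by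
  intro pixels w h_ _hdom hpre
  obtain ⟨hw0, hh0, _hsz⟩ := hpre
  unfold Spec_calculate_final_pixels
  rcases lt_trichotomy w 0 with hw | hw | hw
  · -- w < 0: A's outer loop and B's output comprehension both range over an empty range
    have hr : PySem.List.pyRange 0 w 1 = [] := PySem.List.pyRange_one_eq_nil (by omega)
    simp [calculate_final_pixels, calculate_final_pixels_alt, hr]
  · exact absurd hw hw0
  · lift w to ℕ using hw.le with w'
    have hw' : 0 < w' := by exact_mod_cast hw
    rcases lt_trichotomy h_ 0 with hh | hh | hh
    · -- w > 0, h < 0: A yields w empty rows, B reshapes an empty flat list into w empty slices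
      have hinner : PySem.List.pyRange 0 h_ 1 = [] := PySem.List.pyRange_one_eq_nil (by omega)
      have hwpos : (0 : Int) < (w' : Int) := by exact_mod_cast hw'
      have hszneg : (w' : Int) * h_ < 0 := mul_neg_of_pos_of_neg hwpos hh
      have hsize : PySem.List.pyRange 0 ((w' : Int) * h_) 1 = [] :=
        PySem.List.pyRange_one_eq_nil (le_of_lt hszneg)
      have hneg : PySem.Int.floordiv (pixels.length : Int) ((w' : Int) * h_) ≤ 0 := by
        have h1 := PySem.Int.floordiv_mul_add_mod (pixels.length : Int) ((w' : Int) * h_)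
        have h2 := PySem.Int.mod_neg_bounds (pixels.length : Int) hszneg
        have h3 : (0 : Int) ≤ (pixels.length : Int) := Int.natCast_nonneg _
        by_contra hcon
        push_neg at hcon
        nlinarith [mul_nonneg (by linarith : (0:ℤ) ≤ PySem.Int.floordiv (pixels.length : Int) ((w' : Int) * h_) - 1) (by linarith : (0:ℤ) ≤ -((w' : Int) * h_))]
      have hlayers : PySem.List.pyRange 0 (PySem.Int.floordiv (pixels.length : Int) ((w' : Int) * h_)) 1 = [] :=
        PySem.List.pyRange_one_eq_nil hneg
      simp only [calculate_final_pixels, calculate_final_pixels_alt, hinner, hsize, hlayers,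
        List.foldl_nil, List.map_nil]
      rw [foldl_pair_const]
      simp [slice_nil]
    · exact absurd hh hh0
    · lift h_ to ℕ using hh.le with h'
      have hh' : 0 < h' := by exact_mod_cast hh
      -- B's layers are the (w'*h')-chunks of pixels
      have hBlayers :
          (PySem.List.pyRange 0 (PySem.Int.floordiv (pixels.length : Int) ((w' : Int) * (h' : Int))) 1).map
            (fun k => PySem.List.slice pixels (some (k * ((w' : Int) * (h' : Int)))) (some ((k + 1) * ((w' : Int) * (h' : Int)))))
          = chunks (w' * h') pixels := by
        rw [← Nat.cast_mul w' h', PySem.Int.floordiv_natCast, PySem.List.pyRange_one, List.map_map]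
        have hq : ((pixels.length / (w' * h') : Nat) : Int) - 0 = ((pixels.length / (w' * h') : Nat) : Int) := by ring
        rw [hq, Int.toNat_natCast]
        rw [← range_map_slice_eq_chunks (w' * h') (by positivity) pixels.length pixels rfl]
        apply List.map_congr_left
        intro k _
        simp only [Function.comp_apply, zero_add]
        rw [show ((k : Int)) * ((w' * h' : Nat) : Int) = (((k * (w' * h')) : Nat) : Int) by push_cast; ring,
            show ((k : Int) + 1) * ((w' * h' : Nat) : Int) = (((k * (w' * h')) : Nat) : Int) + ((w' * h' : Nat) : Int) by push_cast; ring,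
            PySem.List.slice_natCast_add]
      -- A's flattened layers are the same chunks
      have hAlayers : (iterLayers pixels (w' : Int) (h' : Int)).map List.flatten
          = chunks (w' * h') pixels := by
        rw [iterLayers_eq pixels w' h' hw' hh',
          map_flatten_chunks_chunks w' h' hw' hh' pixels.length pixels rfl]
      -- close both sides against the shared (range w').map (range h').map form
      simp only [calculate_final_pixels, calculate_final_pixels_alt]
      rw [hAlayers, hBlayers,
        A_outer (PySem.List.pyRange 0 (h' : Int) 1) (PySem.List.pyRange 0 (w' : Int) 1)
          (chunks (w' * h') pixels) []]
      simp only [PySem.List.length_pyRange_one, Int.sub_zero, Int.toNat_natCast, List.nil_append]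
      rw [← Nat.cast_mul w' h', PySem.List.pyRange_one 0 ((w' * h' : Nat) : Int),
        PySem.List.pyRange_one 0 ((w' : Nat) : Int), List.map_map, List.map_map]
      simp only [Int.sub_zero, Int.toNat_natCast]
      apply List.map_congr_left
      intro k hk
      have hkw : k < w' := List.mem_range.mp hk
      simp only [Function.comp_apply, zero_add]
      rw [show ((k : Int)) * ((h' : Nat) : Int) = (((k * h') : Nat) : Int) by push_cast; ring,
          show ((k : Int) + 1) * ((h' : Nat) : Int) = (((k * h') : Nat) : Int) + ((h' : Nat) : Int) by push_cast; ring,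
          PySem.List.slice_natCast_add]
      rw [map_range_drop_take _ (w' * h') (k * h') h'
        (by have hs := Nat.succ_le_of_lt hkw
            calc k * h' + h' = (k + 1) * h' := by ring
              _ ≤ w' * h' := Nat.mul_le_mul_right _ hs)]
      apply List.map_congr_left
      intro c _
      rw [firstBreak_eq_firstOpaque]
      simp only [Function.comp_apply]
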